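-- pv_equiv track=rewrite | github.com/miliar/Code_Jam_Webscraper | solutions_python/solutions_year16_round0_nr2/3671.py | uniform
-- ===== SOURCE A (Python) =====
-- def uniform(stack):
--     numMinus=0
--     for p in stack:
--         if p=='-':
--             numMinus+=1
--     if numMinus==len(stack):
--         return '-'
--     elif numMinus==0:
--         return '+'
--     else:
--         return 'n'
-- ===== SOURCE B (Python) =====
-- def uniform(stack):
--     s = set(stack)
--     if s <= {'-'}:
--         return '-'
--     if '-' not in s:
--         return '+'
--     return 'n'
-- ===== Notes on version B (the rewrite author's own statement) =====
-- stated objective: idiomatic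
-- what changed: B builds the set of distinct elements once and decides by subset/membership tests instead of counting '-' occurrences in a loop and comparing the counter to the length.
import Mathlib
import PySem

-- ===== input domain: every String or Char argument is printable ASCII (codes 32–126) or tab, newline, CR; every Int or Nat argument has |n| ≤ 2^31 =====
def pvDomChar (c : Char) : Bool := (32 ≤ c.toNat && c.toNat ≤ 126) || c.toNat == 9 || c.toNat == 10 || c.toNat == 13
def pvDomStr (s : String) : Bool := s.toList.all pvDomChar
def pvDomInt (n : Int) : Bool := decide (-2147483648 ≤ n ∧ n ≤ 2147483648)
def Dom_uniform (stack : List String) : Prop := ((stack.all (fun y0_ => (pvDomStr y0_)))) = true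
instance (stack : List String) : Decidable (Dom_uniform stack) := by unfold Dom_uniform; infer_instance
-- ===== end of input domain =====

-- B replaces A's minus-counter loop with a distinct-element set decided by subset/membership tests (idiomatic; same cost).


-- ===== PORT A =====
def uniform (stack : List String) : String :=
  let numMinus : Int := stack.foldl (fun n p => if p = "-" then n + 1 else n) 0
  if numMinus = (stack.length : Int) then "-"
  else if numMinus = 0 then "+"
  else "n"

-- ===== PORT B =====
def uniform_alt (stack : List String) : String :=
  let s : PySem.Set String := PySem.Set.ofList stack
  if PySem.Set.issubset s ["-"] then "-"
  else if ¬ (PySem.Set.contains s "-" = true) then "+"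
  else "n"

-- ===== PRECONDITION & SPEC =====
def Spec_uniform (stack : List String) (out : String) : Prop := out = uniform_alt stack
instance (stack : List String) (out : String) : Decidable (Spec_uniform stack out) := by unfold Spec_uniform; infer_instance

-- ===== CLAIM (what is proved, stated in full; the proofs are below) =====
def Claim_equal_uniform : Prop := ∀ (stack : List String), Dom_uniform stack → Spec_uniform stack (uniform stack)

-- ===== LEMMAS AND PROOFS =====
theorem uniform_count (stack : List String) (n : Int) :
    stack.foldl (fun n p => if p = "-" then n + 1 else n) n
      = n + (stack.countP (fun p => p = "-") : Int) := by
  induction stack generalizing n with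
  | nil => simp
  | cons h t ih =>
    simp only [List.foldl_cons, List.countP_cons, ih]
    by_cases hh : h = "-" <;> simp [hh] <;> try omega

theorem uniform_sub (stack : List String) :
    PySem.Set.issubset (PySem.Set.ofList stack) ["-"] = true ↔ ∀ x ∈ stack, x = "-" := by
  rw [PySem.Set.issubset_iff]
  simp [PySem.Set.mem_ofList]

theorem uniform_mem (stack : List String) :
    PySem.Set.contains (PySem.Set.ofList stack) "-" = true ↔ "-" ∈ stack := by
  simp [PySem.Set.contains, PySem.Set.mem_ofList]

-- ===== VERDICT (by name: the statement is the Claim_ definition above) =====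
theorem uniform_spec : Claim_equal_uniform := by
  intro stack _
  unfold Spec_uniform uniform uniform_alt
  simp only [uniform_count, zero_add]
  have hcnt : ((stack.countP (fun p => p = "-") : Int) = (stack.length : Int)) ↔ ∀ x ∈ stack, x = "-" := by
    rw [Int.natCast_inj, List.countP_eq_length]; simp
  have hz : ((stack.countP (fun p => p = "-") : Int) = 0) ↔ "-" ∉ stack := by
    rw [show ((0:Int) = ((0:Nat):Int)) from rfl, Int.natCast_inj, List.countP_eq_zero]
    simp only [decide_eq_true_eq]
    exact ⟨fun h hm => h _ hm rfl, fun h a ha he => h (he ▸ ha)⟩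
  by_cases h1 : ∀ x ∈ stack, x = "-"
  · rw [if_pos (hcnt.mpr h1), if_pos ((uniform_sub stack).mpr h1)]
  · rw [if_neg (fun hc => h1 (hcnt.mp hc)), if_neg (fun hc => h1 ((uniform_sub stack).mp hc))]
    by_cases h2 : "-" ∈ stack
    · rw [if_neg (fun hc => (hz.mp hc) h2), if_neg (fun hc => hc ((uniform_mem stack).mpr h2))]
    · rw [if_pos (hz.mpr h2), if_pos (fun hc => h2 ((uniform_mem stack).mp hc))]
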